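-- pv_equiv track=rewrite | github.com/vdjserver/repertoire-summarization | mutations_RW_motif.py | find_rw_distribution
-- ===== SOURCE A (Python) =====
-- regions = {'fwr1':(0, 78), 'cdr1':(78, 117), 'fwr2':(117, 168), 'cdr2':(168, 198), 'fwr3':(198, 315)}
--
-- def find_rw_distribution(rw_idx:dict)->dict:
--     '''
--     Tallies-up the number of rw motifs contained within a region
--     Ignores overlap between regions
--
--     Parameters
--     ----------
--     rw_idx : dict
--         from find_rw_motifs(). {motif_index : motif}
--
--     Returns
--     -------
--     distribution : dict
--         contains the distribution as {<region name>:<rw motif count>}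
--     '''
--     distribution = {'fwr1':0, 'cdr1':0,
--                     'fwr2':0, 'cdr2':0,
--                     'fwr3':0}
--
--     # Move through each region
--     for region_name, region_start_end in regions.items():
--         for idx, rw in rw_idx.items():
--
--             if idx >= region_start_end[0] and idx < region_start_end[1]-len(rw):
--                 distribution[region_name] += 1
--
--     return distribution
-- ===== SOURCE B (Python) =====
-- regions = {'fwr1':(0, 78), 'cdr1':(78, 117), 'fwr2':(117, 168), 'cdr2':(168, 198), 'fwr3':(198, 315)}
--
-- def find_rw_distribution(rw_idx:dict)->dict:
--     # Single pass: classify each motif index into its unique containing region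
--     # by boundary comparisons, instead of re-scanning all motifs per region.
--     distribution = {'fwr1':0, 'cdr1':0,
--                     'fwr2':0, 'cdr2':0,
--                     'fwr3':0}
--     for idx, rw in rw_idx.items():
--         if idx < 0 or idx >= 315:
--             continue
--         if idx < 78:
--             name, end = 'fwr1', 78
--         elif idx < 117:
--             name, end = 'cdr1', 117
--         elif idx < 168:
--             name, end = 'fwr2', 168
--         elif idx < 198:
--             name, end = 'cdr2', 198
--         else:
--             name, end = 'fwr3', 315
--         if idx < end - len(rw):
--             distribution[name] += 1
--     return distribution
-- ===== Notes on version B (the rewrite author's own statement) =====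
-- stated objective: alternative
-- what changed: B replaces A's nested loop (for each of the 5 regions, re-scan every motif) with a single pass over the motifs that classifies each index into its unique containing region by boundary comparisons and increments just that region's counter.
import Mathlib
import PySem

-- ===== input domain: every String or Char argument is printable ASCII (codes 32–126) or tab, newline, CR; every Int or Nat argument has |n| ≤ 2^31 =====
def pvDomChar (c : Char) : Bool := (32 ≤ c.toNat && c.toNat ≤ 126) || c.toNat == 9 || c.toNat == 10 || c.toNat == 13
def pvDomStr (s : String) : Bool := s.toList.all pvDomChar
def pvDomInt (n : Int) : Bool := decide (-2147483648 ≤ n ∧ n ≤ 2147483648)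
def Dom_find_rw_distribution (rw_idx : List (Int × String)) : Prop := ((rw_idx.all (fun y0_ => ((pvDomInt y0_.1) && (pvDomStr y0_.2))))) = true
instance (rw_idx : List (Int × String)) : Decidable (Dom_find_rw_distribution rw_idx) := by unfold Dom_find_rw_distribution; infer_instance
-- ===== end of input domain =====

-- B makes ONE pass over the motifs, classifying each index into its unique region by
-- boundary comparisons, instead of A's pass over all motifs for every region.

-- ===== PORT A =====
-- module constant `regions` (a dict literal, iterated with .items())
def pvRegionsA : List (String × Int × Int) :=
  [("fwr1", 0, 78), ("cdr1", 78, 117), ("fwr2", 117, 168), ("cdr2", 168, 198), ("fwr3", 198, 315)]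

def find_rw_distribution (rw_idx : List (Int × String)) : List (String × Int) :=
  -- rw_idx is a Python dict: Dict.ofList reproduces dict(pairs)'s duplicate-key collapse
  let items := (PySem.Dict.ofList rw_idx).items
  -- distribution[name] += 1 : the key is always present, so it is modify with default 0
  (pvRegionsA.foldl (fun dist r =>
      items.foldl (fun dist x =>
        if x.1 ≥ r.2.1 ∧ x.1 < r.2.2 - PySem.Str.len x.2
        then dist.modify r.1 0 (· + 1) else dist) dist)
    (PySem.Dict.ofList [("fwr1", 0), ("cdr1", 0), ("fwr2", 0), ("cdr2", 0), ("fwr3", 0)])).items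

-- ===== PORT B =====
def find_rw_distribution_alt (rw_idx : List (Int × String)) : List (String × Int) :=
  let items := (PySem.Dict.ofList rw_idx).items
  (items.foldl (fun dist x =>
      if x.1 < 0 ∨ x.1 ≥ 315 then dist
      else
        let ne : String × Int :=
          if x.1 < 78 then ("fwr1", 78)
          else if x.1 < 117 then ("cdr1", 117)
          else if x.1 < 168 then ("fwr2", 168)
          else if x.1 < 198 then ("cdr2", 198)
          else ("fwr3", 315)
        if x.1 < ne.2 - PySem.Str.len x.2 then dist.modify ne.1 0 (· + 1) else dist)
    (PySem.Dict.ofList [("fwr1", 0), ("cdr1", 0), ("fwr2", 0), ("cdr2", 0), ("fwr3", 0)])).items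

-- ===== PRECONDITION & SPEC =====
def Spec_find_rw_distribution (rw_idx : List (Int × String)) (out : List (String × Int)) : Prop := out = find_rw_distribution_alt rw_idx
instance (rw_idx : List (Int × String)) (out : List (String × Int)) : Decidable (Spec_find_rw_distribution rw_idx out) := by unfold Spec_find_rw_distribution; infer_instance

-- ===== CLAIM (what is proved, stated in full; the proofs are below) =====
def Claim_equal_find_rw_distribution : Prop := ∀ (rw_idx : List (Int × String)), Dom_find_rw_distribution rw_idx → Spec_find_rw_distribution rw_idx (find_rw_distribution rw_idx)

-- ===== LEMMAS AND PROOFS =====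

-- the five-counter distribution dict, in A's (and B's) key order
def pvD (a1 a2 a3 a4 a5 : Int) : PySem.Dict String Int :=
  PySem.Dict.mk [("fwr1", a1), ("cdr1", a2), ("fwr2", a3), ("cdr2", a4), ("fwr3", a5)]

-- A's region-membership test (start s, end e), as a Bool
def pvB (s e : Int) (x : Int × String) : Bool := decide (x.1 ≥ s ∧ x.1 < e - PySem.Str.len x.2)

theorem pvLen_nonneg (s : String) : 0 ≤ PySem.Str.len s := by
  simp [PySem.Str.len_eq]

theorem pvModify1 (a1 a2 a3 a4 a5 : Int) :
    (pvD a1 a2 a3 a4 a5).modify "fwr1" 0 (· + 1) = pvD (a1 + 1) a2 a3 a4 a5 := by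
  simp [pvD, PySem.Dict.modify, PySem.Dict.insert, PySem.Dict.getD, PySem.Dict.get?, PySem.Dict.contains]

theorem pvModify2 (a1 a2 a3 a4 a5 : Int) :
    (pvD a1 a2 a3 a4 a5).modify "cdr1" 0 (· + 1) = pvD a1 (a2 + 1) a3 a4 a5 := by
  simp [pvD, PySem.Dict.modify, PySem.Dict.insert, PySem.Dict.getD, PySem.Dict.get?, PySem.Dict.contains]

theorem pvModify3 (a1 a2 a3 a4 a5 : Int) :
    (pvD a1 a2 a3 a4 a5).modify "fwr2" 0 (· + 1) = pvD a1 a2 (a3 + 1) a4 a5 := by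
  simp [pvD, PySem.Dict.modify, PySem.Dict.insert, PySem.Dict.getD, PySem.Dict.get?, PySem.Dict.contains]

theorem pvModify4 (a1 a2 a3 a4 a5 : Int) :
    (pvD a1 a2 a3 a4 a5).modify "cdr2" 0 (· + 1) = pvD a1 a2 a3 (a4 + 1) a5 := by
  simp [pvD, PySem.Dict.modify, PySem.Dict.insert, PySem.Dict.getD, PySem.Dict.get?, PySem.Dict.contains]

theorem pvModify5 (a1 a2 a3 a4 a5 : Int) :
    (pvD a1 a2 a3 a4 a5).modify "fwr3" 0 (· + 1) = pvD a1 a2 a3 a4 (a5 + 1) := by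
  simp [pvD, PySem.Dict.modify, PySem.Dict.insert, PySem.Dict.getD, PySem.Dict.get?, PySem.Dict.contains]

theorem foldA1 (l : List (Int × String)) (a1 a2 a3 a4 a5 : Int) :
    l.foldl (fun dist x => if x.1 ≥ 0 ∧ x.1 < 78 - PySem.Str.len x.2 then dist.modify "fwr1" 0 (· + 1) else dist) (pvD a1 a2 a3 a4 a5)
      = pvD (a1 + (l.countP (pvB 0 78) : Int)) a2 a3 a4 a5 := by
  induction l generalizing a1 with
  | nil => simp
  | cons x t ih =>
    by_cases h : x.1 ≥ 0 ∧ x.1 < 78 - PySem.Str.len x.2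
    · have hb : pvB 0 78 x = true := decide_eq_true h
      rw [List.foldl_cons, if_pos h, pvModify1, ih, List.countP_cons, hb]
      simp [pvD]; omega
    · have hb : pvB 0 78 x = false := decide_eq_false h
      rw [List.foldl_cons, if_neg h, ih, List.countP_cons, hb]
      simp

theorem foldA2 (l : List (Int × String)) (a1 a2 a3 a4 a5 : Int) :
    l.foldl (fun dist x => if x.1 ≥ 78 ∧ x.1 < 117 - PySem.Str.len x.2 then dist.modify "cdr1" 0 (· + 1) else dist) (pvD a1 a2 a3 a4 a5)
      = pvD a1 (a2 + (l.countP (pvB 78 117) : Int)) a3 a4 a5 := by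
  induction l generalizing a2 with
  | nil => simp
  | cons x t ih =>
    by_cases h : x.1 ≥ 78 ∧ x.1 < 117 - PySem.Str.len x.2
    · have hb : pvB 78 117 x = true := decide_eq_true h
      rw [List.foldl_cons, if_pos h, pvModify2, ih, List.countP_cons, hb]
      simp [pvD]; omega
    · have hb : pvB 78 117 x = false := decide_eq_false h
      rw [List.foldl_cons, if_neg h, ih, List.countP_cons, hb]
      simp

theorem foldA3 (l : List (Int × String)) (a1 a2 a3 a4 a5 : Int) :
    l.foldl (fun dist x => if x.1 ≥ 117 ∧ x.1 < 168 - PySem.Str.len x.2 then dist.modify "fwr2" 0 (· + 1) else dist) (pvD a1 a2 a3 a4 a5)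
      = pvD a1 a2 (a3 + (l.countP (pvB 117 168) : Int)) a4 a5 := by
  induction l generalizing a3 with
  | nil => simp
  | cons x t ih =>
    by_cases h : x.1 ≥ 117 ∧ x.1 < 168 - PySem.Str.len x.2
    · have hb : pvB 117 168 x = true := decide_eq_true h
      rw [List.foldl_cons, if_pos h, pvModify3, ih, List.countP_cons, hb]
      simp [pvD]; omega
    · have hb : pvB 117 168 x = false := decide_eq_false h
      rw [List.foldl_cons, if_neg h, ih, List.countP_cons, hb]
      simp

theorem foldA4 (l : List (Int × String)) (a1 a2 a3 a4 a5 : Int) :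
    l.foldl (fun dist x => if x.1 ≥ 168 ∧ x.1 < 198 - PySem.Str.len x.2 then dist.modify "cdr2" 0 (· + 1) else dist) (pvD a1 a2 a3 a4 a5)
      = pvD a1 a2 a3 (a4 + (l.countP (pvB 168 198) : Int)) a5 := by
  induction l generalizing a4 with
  | nil => simp
  | cons x t ih =>
    by_cases h : x.1 ≥ 168 ∧ x.1 < 198 - PySem.Str.len x.2
    · have hb : pvB 168 198 x = true := decide_eq_true h
      rw [List.foldl_cons, if_pos h, pvModify4, ih, List.countP_cons, hb]
      simp [pvD]; omega
    · have hb : pvB 168 198 x = false := decide_eq_false h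
      rw [List.foldl_cons, if_neg h, ih, List.countP_cons, hb]
      simp

theorem foldA5 (l : List (Int × String)) (a1 a2 a3 a4 a5 : Int) :
    l.foldl (fun dist x => if x.1 ≥ 198 ∧ x.1 < 315 - PySem.Str.len x.2 then dist.modify "fwr3" 0 (· + 1) else dist) (pvD a1 a2 a3 a4 a5)
      = pvD a1 a2 a3 a4 (a5 + (l.countP (pvB 198 315) : Int)) := by
  induction l generalizing a5 with
  | nil => simp
  | cons x t ih =>
    by_cases h : x.1 ≥ 198 ∧ x.1 < 315 - PySem.Str.len x.2
    · have hb : pvB 198 315 x = true := decide_eq_true h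
      rw [List.foldl_cons, if_pos h, pvModify5, ih, List.countP_cons, hb]
      simp [pvD]; omega
    · have hb : pvB 198 315 x = false := decide_eq_false h
      rw [List.foldl_cons, if_neg h, ih, List.countP_cons, hb]
      simp

-- B's loop body (after reducing the `let`), rewritten as a chain over A's five region
-- tests: an index satisfies the test of at most one region, and B bumps exactly that one.
theorem pvStepB_eq (d : PySem.Dict String Int) (x : Int × String) :
    (if x.1 < 0 ∨ x.1 ≥ 315 then d
     else
       if x.1 < (if x.1 < 78 then (("fwr1":String), (78:Int))
                 else if x.1 < 117 then ("cdr1", 117)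
                 else if x.1 < 168 then ("fwr2", 168)
                 else if x.1 < 198 then ("cdr2", 198)
                 else ("fwr3", 315)).2 - PySem.Str.len x.2 then
         d.modify (if x.1 < 78 then (("fwr1":String), (78:Int))
                   else if x.1 < 117 then ("cdr1", 117)
                   else if x.1 < 168 then ("fwr2", 168)
                   else if x.1 < 198 then ("cdr2", 198)
                   else ("fwr3", 315)).1 0 (· + 1)
       else d)
    = if x.1 ≥ 0 ∧ x.1 < 78 - PySem.Str.len x.2 then d.modify "fwr1" 0 (· + 1)
      else if x.1 ≥ 78 ∧ x.1 < 117 - PySem.Str.len x.2 then d.modify "cdr1" 0 (· + 1)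
      else if x.1 ≥ 117 ∧ x.1 < 168 - PySem.Str.len x.2 then d.modify "fwr2" 0 (· + 1)
      else if x.1 ≥ 168 ∧ x.1 < 198 - PySem.Str.len x.2 then d.modify "cdr2" 0 (· + 1)
      else if x.1 ≥ 198 ∧ x.1 < 315 - PySem.Str.len x.2 then d.modify "fwr3" 0 (· + 1)
      else d := by
  have hlen := pvLen_nonneg x.2
  split_ifs <;> first | rfl | omega

theorem foldB (l : List (Int × String)) (a1 a2 a3 a4 a5 : Int) :
    l.foldl (fun dist x =>
      (if x.1 < 0 ∨ x.1 ≥ 315 then dist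
     else
       if x.1 < (if x.1 < 78 then (("fwr1":String), (78:Int))
                 else if x.1 < 117 then ("cdr1", 117)
                 else if x.1 < 168 then ("fwr2", 168)
                 else if x.1 < 198 then ("cdr2", 198)
                 else ("fwr3", 315)).2 - PySem.Str.len x.2 then
         dist.modify (if x.1 < 78 then (("fwr1":String), (78:Int))
                   else if x.1 < 117 then ("cdr1", 117)
                   else if x.1 < 168 then ("fwr2", 168)
                   else if x.1 < 198 then ("cdr2", 198)
                   else ("fwr3", 315)).1 0 (· + 1)
       else dist)) (pvD a1 a2 a3 a4 a5)
      = pvD (a1 + (l.countP (pvB 0 78) : Int))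
            (a2 + (l.countP (pvB 78 117) : Int))
            (a3 + (l.countP (pvB 117 168) : Int))
            (a4 + (l.countP (pvB 168 198) : Int))
            (a5 + (l.countP (pvB 198 315) : Int)) := by
  induction l generalizing a1 a2 a3 a4 a5 with
  | nil => simp
  | cons x t ih =>
    have hlen := pvLen_nonneg x.2
    rw [List.foldl_cons, pvStepB_eq]
    by_cases h1 : x.1 ≥ 0 ∧ x.1 < 78 - PySem.Str.len x.2
    · have hb1 : pvB 0 78 x = true := decide_eq_true h1
      have h2 : ¬ (x.1 ≥ 78 ∧ x.1 < 117 - PySem.Str.len x.2) := by omega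
      have hb2 : pvB 78 117 x = false := decide_eq_false h2
      have h3 : ¬ (x.1 ≥ 117 ∧ x.1 < 168 - PySem.Str.len x.2) := by omega
      have hb3 : pvB 117 168 x = false := decide_eq_false h3
      have h4 : ¬ (x.1 ≥ 168 ∧ x.1 < 198 - PySem.Str.len x.2) := by omega
      have hb4 : pvB 168 198 x = false := decide_eq_false h4
      have h5 : ¬ (x.1 ≥ 198 ∧ x.1 < 315 - PySem.Str.len x.2) := by omega
      have hb5 : pvB 198 315 x = false := decide_eq_false h5
      rw [if_pos h1, pvModify1, ih, List.countP_cons, List.countP_cons, List.countP_cons, List.countP_cons, List.countP_cons, hb1, hb2, hb3, hb4, hb5]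
      simp [pvD]; omega
    ·
      by_cases h2 : x.1 ≥ 78 ∧ x.1 < 117 - PySem.Str.len x.2
      · have hb2 : pvB 78 117 x = true := decide_eq_true h2
        have h1 : ¬ (x.1 ≥ 0 ∧ x.1 < 78 - PySem.Str.len x.2) := by omega
        have hb1 : pvB 0 78 x = false := decide_eq_false h1
        have h3 : ¬ (x.1 ≥ 117 ∧ x.1 < 168 - PySem.Str.len x.2) := by omega
        have hb3 : pvB 117 168 x = false := decide_eq_false h3
        have h4 : ¬ (x.1 ≥ 168 ∧ x.1 < 198 - PySem.Str.len x.2) := by omega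
        have hb4 : pvB 168 198 x = false := decide_eq_false h4
        have h5 : ¬ (x.1 ≥ 198 ∧ x.1 < 315 - PySem.Str.len x.2) := by omega
        have hb5 : pvB 198 315 x = false := decide_eq_false h5
        rw [if_neg h1, if_pos h2, pvModify2, ih, List.countP_cons, List.countP_cons, List.countP_cons, List.countP_cons, List.countP_cons, hb1, hb2, hb3, hb4, hb5]
        simp [pvD]; omega
      ·
        by_cases h3 : x.1 ≥ 117 ∧ x.1 < 168 - PySem.Str.len x.2
        · have hb3 : pvB 117 168 x = true := decide_eq_true h3
          have h1 : ¬ (x.1 ≥ 0 ∧ x.1 < 78 - PySem.Str.len x.2) := by omega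
          have hb1 : pvB 0 78 x = false := decide_eq_false h1
          have h2 : ¬ (x.1 ≥ 78 ∧ x.1 < 117 - PySem.Str.len x.2) := by omega
          have hb2 : pvB 78 117 x = false := decide_eq_false h2
          have h4 : ¬ (x.1 ≥ 168 ∧ x.1 < 198 - PySem.Str.len x.2) := by omega
          have hb4 : pvB 168 198 x = false := decide_eq_false h4
          have h5 : ¬ (x.1 ≥ 198 ∧ x.1 < 315 - PySem.Str.len x.2) := by omega
          have hb5 : pvB 198 315 x = false := decide_eq_false h5
          rw [if_neg h1, if_neg h2, if_pos h3, pvModify3, ih, List.countP_cons, List.countP_cons, List.countP_cons, List.countP_cons, List.countP_cons, hb1, hb2, hb3, hb4, hb5]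
          simp [pvD]; omega
        ·
          by_cases h4 : x.1 ≥ 168 ∧ x.1 < 198 - PySem.Str.len x.2
          · have hb4 : pvB 168 198 x = true := decide_eq_true h4
            have h1 : ¬ (x.1 ≥ 0 ∧ x.1 < 78 - PySem.Str.len x.2) := by omega
            have hb1 : pvB 0 78 x = false := decide_eq_false h1
            have h2 : ¬ (x.1 ≥ 78 ∧ x.1 < 117 - PySem.Str.len x.2) := by omega
            have hb2 : pvB 78 117 x = false := decide_eq_false h2
            have h3 : ¬ (x.1 ≥ 117 ∧ x.1 < 168 - PySem.Str.len x.2) := by omega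
            have hb3 : pvB 117 168 x = false := decide_eq_false h3
            have h5 : ¬ (x.1 ≥ 198 ∧ x.1 < 315 - PySem.Str.len x.2) := by omega
            have hb5 : pvB 198 315 x = false := decide_eq_false h5
            rw [if_neg h1, if_neg h2, if_neg h3, if_pos h4, pvModify4, ih, List.countP_cons, List.countP_cons, List.countP_cons, List.countP_cons, List.countP_cons, hb1, hb2, hb3, hb4, hb5]
            simp [pvD]; omega
          ·
            by_cases h5 : x.1 ≥ 198 ∧ x.1 < 315 - PySem.Str.len x.2
            · have hb5 : pvB 198 315 x = true := decide_eq_true h5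
              have h1 : ¬ (x.1 ≥ 0 ∧ x.1 < 78 - PySem.Str.len x.2) := by omega
              have hb1 : pvB 0 78 x = false := decide_eq_false h1
              have h2 : ¬ (x.1 ≥ 78 ∧ x.1 < 117 - PySem.Str.len x.2) := by omega
              have hb2 : pvB 78 117 x = false := decide_eq_false h2
              have h3 : ¬ (x.1 ≥ 117 ∧ x.1 < 168 - PySem.Str.len x.2) := by omega
              have hb3 : pvB 117 168 x = false := decide_eq_false h3
              have h4 : ¬ (x.1 ≥ 168 ∧ x.1 < 198 - PySem.Str.len x.2) := by omega
              have hb4 : pvB 168 198 x = false := decide_eq_false h4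
              rw [if_neg h1, if_neg h2, if_neg h3, if_neg h4, if_pos h5, pvModify5, ih, List.countP_cons, List.countP_cons, List.countP_cons, List.countP_cons, List.countP_cons, hb1, hb2, hb3, hb4, hb5]
              simp [pvD]; omega
            ·
              have hb1 : pvB 0 78 x = false := decide_eq_false h1
              have hb2 : pvB 78 117 x = false := decide_eq_false h2
              have hb3 : pvB 117 168 x = false := decide_eq_false h3
              have hb4 : pvB 168 198 x = false := decide_eq_false h4
              have hb5 : pvB 198 315 x = false := decide_eq_false h5
              rw [if_neg h1, if_neg h2, if_neg h3, if_neg h4, if_neg h5, ih, List.countP_cons, List.countP_cons, List.countP_cons, List.countP_cons, List.countP_cons, hb1, hb2, hb3, hb4, hb5]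
              simp

theorem pvD0 : PySem.Dict.ofList [("fwr1", (0:Int)), ("cdr1", 0), ("fwr2", 0), ("cdr2", 0), ("fwr3", 0)] = pvD 0 0 0 0 0 := by
  decide

-- ===== VERDICT (by name: the statement is the Claim_ definition above) =====
theorem find_rw_distribution_spec : Claim_equal_find_rw_distribution := by
  intro rw_idx _
  unfold Spec_find_rw_distribution
  simp only [find_rw_distribution, find_rw_distribution_alt, pvRegionsA,
             List.foldl_cons, List.foldl_nil, pvD0]
  rw [foldA1, foldA2, foldA3, foldA4, foldA5, foldB]
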